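-- pv_equiv track=rewrite | github.com/DegenerateUSER/pn-backend | api/serializers.py | calculate_total_marks_and_duration_by_set
-- ===== SOURCE A (Python) =====
-- from collections import defaultdict
--
-- def calculate_total_marks_and_duration_by_set(questions_data):
--     """Calculate total net scoring potential and duration for each set number"""
--     set_marks = defaultdict(int)
--     set_duration = defaultdict(int)
--
--     for question in questions_data:
--         set_num = question.get('set_number', 1)
--         positive_marks = question.get('positive_marks', 0)
--         negative_marks = question.get('negative_marks', 0)
--         # Calculate net scoring potential
--         net_marks = positive_marks + negative_marks
--         set_marks[set_num] += net_marks
--         set_duration[set_num] += question.get('time_limit', 0)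
--
--     return dict(set_marks), dict(set_duration)
-- ===== SOURCE B (Python) =====
-- def calculate_total_marks_and_duration_by_set(questions_data):
--     """Calculate total net scoring potential and duration for each set number."""
--     groups = {}
--     for question in questions_data:
--         groups.setdefault(question.get('set_number', 1), []).append(question)
--     set_marks = {}
--     set_duration = {}
--     for set_num, group in groups.items():
--         set_marks[set_num] = sum(q.get('positive_marks', 0) + q.get('negative_marks', 0) for q in group)
--         set_duration[set_num] = sum(q.get('time_limit', 0) for q in group)
--     return set_marks, set_duration
-- ===== Notes on version B (the rewrite author's own statement) =====
-- stated objective: alternative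
-- what changed: Replaces A's on-the-fly defaultdict accumulation with a group-then-aggregate pass: one pass groups questions by set_number, a second pass over the groups sums net marks and time limits per group.
import Mathlib
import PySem

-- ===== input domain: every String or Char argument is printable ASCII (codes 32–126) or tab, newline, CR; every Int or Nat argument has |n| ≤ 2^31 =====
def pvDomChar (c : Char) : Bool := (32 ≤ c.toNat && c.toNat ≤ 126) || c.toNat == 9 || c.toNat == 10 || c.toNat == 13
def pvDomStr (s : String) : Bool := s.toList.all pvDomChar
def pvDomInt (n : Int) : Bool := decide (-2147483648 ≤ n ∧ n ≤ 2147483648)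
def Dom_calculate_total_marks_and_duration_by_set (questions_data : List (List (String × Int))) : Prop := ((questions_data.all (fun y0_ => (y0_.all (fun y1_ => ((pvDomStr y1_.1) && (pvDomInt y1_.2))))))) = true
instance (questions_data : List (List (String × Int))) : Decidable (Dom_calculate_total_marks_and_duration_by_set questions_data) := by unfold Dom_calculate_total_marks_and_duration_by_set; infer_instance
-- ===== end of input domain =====

-- B replaces A's on-the-fly defaultdict accumulation by group-by-set_number then aggregate per group (alternative decomposition, same cost).

-- ===== PORT A =====
-- A: one loop over questions_data, two defaultdict(int) accumulators keyed by set_number.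
def calculate_total_marks_and_duration_by_set (questions_data : List (List (String × Int))) : (List (Int × Int)) × (List (Int × Int)) :=
  let res := questions_data.foldl
    (fun (acc : PySem.Dict Int Int × PySem.Dict Int Int) question =>
      let set_num := (PySem.Dict.mk question).getD "set_number" 1
      let positive_marks := (PySem.Dict.mk question).getD "positive_marks" 0
      let negative_marks := (PySem.Dict.mk question).getD "negative_marks" 0
      let net_marks := positive_marks + negative_marks
      (acc.1.modify set_num 0 (fun x => x + net_marks),
       acc.2.modify set_num 0 (fun x => x + (PySem.Dict.mk question).getD "time_limit" 0)))
    (PySem.Dict.empty, PySem.Dict.empty)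
  (res.1.items, res.2.items)

-- ===== PORT B =====
def pvKeyOf (question : List (String × Int)) : Int := (PySem.Dict.mk question).getD "set_number" 1
def pvNet (q : List (String × Int)) : Int :=
  (PySem.Dict.mk q).getD "positive_marks" 0 + (PySem.Dict.mk q).getD "negative_marks" 0
def pvTime (q : List (String × Int)) : Int := (PySem.Dict.mk q).getD "time_limit" 0

-- B: first loop groups questions by set_number (setdefault(k, []).append(q) = modify k [] (· ++ [q])),
-- second loop over groups.items sums net marks and time limits per group.
def calculate_total_marks_and_duration_by_set_alt (questions_data : List (List (String × Int))) : (List (Int × Int)) × (List (Int × Int)) :=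
  let groups : PySem.Dict Int (List (List (String × Int))) :=
    questions_data.foldl (fun g question => g.modify (pvKeyOf question) [] (fun x => x ++ [question])) PySem.Dict.empty
  let res := groups.items.foldl
    (fun (acc : PySem.Dict Int Int × PySem.Dict Int Int) p =>
      (acc.1.insert p.1 (p.2.map pvNet).sum,
       acc.2.insert p.1 (p.2.map pvTime).sum))
    (PySem.Dict.empty, PySem.Dict.empty)
  (res.1.items, res.2.items)

-- ===== PRECONDITION & SPEC =====
def Spec_calculate_total_marks_and_duration_by_set (questions_data : List (List (String × Int))) (out : (List (Int × Int)) × (List (Int × Int))) : Prop := out = calculate_total_marks_and_duration_by_set_alt questions_data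
instance (questions_data : List (List (String × Int))) (out : (List (Int × Int)) × (List (Int × Int))) : Decidable (Spec_calculate_total_marks_and_duration_by_set questions_data out) := by unfold Spec_calculate_total_marks_and_duration_by_set; infer_instance

-- ===== CLAIM (what is proved, stated in full; the proofs are below) =====
def Claim_equal_calculate_total_marks_and_duration_by_set : Prop := ∀ (questions_data : List (List (String × Int))), Dom_calculate_total_marks_and_duration_by_set questions_data → Spec_calculate_total_marks_and_duration_by_set questions_data (calculate_total_marks_and_duration_by_set questions_data)

-- ===== LEMMAS AND PROOFS =====

-- A's accumulation loop: final lookup at s is the initial value plus the sum of f over the questions keyed s.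
theorem pv_foldl_modify_add_getD {κ β : Type} [BEq κ] [LawfulBEq κ] [DecidableEq κ]
    (k : β → κ) (f : β → Int) (qs : List β) (d : PySem.Dict κ Int) (s : κ) :
    (qs.foldl (fun d q => d.modify (k q) 0 (fun x => x + f q)) d).getD s 0
      = d.getD s 0 + ((qs.filter (fun q => k q == s)).map f).sum := by
  induction qs generalizing d with
  | nil => simp
  | cons q qs ih =>
      simp only [List.foldl_cons, ih, List.filter_cons]
      by_cases h : k q = s
      · simp [h, List.sum_cons]
        ring
      · have h' : s ≠ k q := fun hs => h hs.symm
        simp [h, PySem.Dict.getD_modify, h']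


-- The grouping loop's lookup at s is exactly the questions keyed s, in order.
theorem pv_groups_getD {κ β : Type} [BEq κ] [LawfulBEq κ]
    (k : β → κ) (qs : List β) (s : κ) :
    (qs.foldl (fun g q => g.modify (k q) [] (fun x => x ++ [q])) (PySem.Dict.empty : PySem.Dict κ (List β))).getD s []
      = qs.filter (fun q => k q == s) := by
  have h := PySem.Dict.getD_foldl_modify_append (qs.map (fun q => (k q, q)))
      (PySem.Dict.empty : PySem.Dict κ (List β)) s
  rw [List.foldl_map] at h
  simpa [List.filter_map, Function.comp_def] using h

-- Both decompositions, stated generically over the key and value functions; A's pair-accumulator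
-- loop equals B's group-then-aggregate pipeline.
theorem pv_main {κ β : Type} [BEq κ] [LawfulBEq κ] [DecidableEq κ]
    (k : β → κ) (f t : β → Int) (qd : List β) :
    (let res := qd.foldl
        (fun acc q => (acc.1.modify (k q) 0 (fun x => x + f q), acc.2.modify (k q) 0 (fun x => x + t q)))
        ((PySem.Dict.empty : PySem.Dict κ Int), (PySem.Dict.empty : PySem.Dict κ Int));
     (res.1.items, res.2.items))
    = (let groups := qd.foldl (fun g q => g.modify (k q) [] (fun x => x ++ [q]))
          (PySem.Dict.empty : PySem.Dict κ (List β));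
       let res := groups.items.foldl
          (fun acc p => (acc.1.insert p.1 (p.2.map f).sum, acc.2.insert p.1 (p.2.map t).sum))
          ((PySem.Dict.empty : PySem.Dict κ Int), (PySem.Dict.empty : PySem.Dict κ Int));
       (res.1.items, res.2.items)) := by
  have hA := PySem.List.foldl_prod_mk
      (fun (d : PySem.Dict κ Int) q => d.modify (k q) 0 (fun x => x + f q))
      (fun (d : PySem.Dict κ Int) q => d.modify (k q) 0 (fun x => x + t q)) qd
      PySem.Dict.empty PySem.Dict.empty
  have hB := PySem.List.foldl_prod_mk
      (fun (d : PySem.Dict κ Int) (p : κ × List β) => d.insert p.1 (p.2.map f).sum)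
      (fun (d : PySem.Dict κ Int) (p : κ × List β) => d.insert p.1 (p.2.map t).sum)
      ((qd.foldl (fun g q => g.modify (k q) [] (fun x => x ++ [q]))
          (PySem.Dict.empty : PySem.Dict κ (List β))).items)
      PySem.Dict.empty PySem.Dict.empty
  simp only [hA, hB]
  set G := qd.foldl (fun g q => g.modify (k q) [] (fun x => x ++ [q]))
      (PySem.Dict.empty : PySem.Dict κ (List β)) with hG
  have hnodG : G.keys.Nodup := by
    rw [hG]
    exact PySem.Dict.nodup_keys_foldl_modify_key qd k [] (fun _ q => fun x => x ++ [q]) _ (by simp)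
  have hG_getD : ∀ s, G.getD s [] = qd.filter (fun q => k q == s) := fun s => by
    rw [hG]; exact pv_groups_getD k qd s
  have side : ∀ g : β → Int,
      (qd.foldl (fun d q => d.modify (k q) 0 (fun x => x + g q)) (PySem.Dict.empty : PySem.Dict κ Int)).items
        = (G.items.foldl (fun d p => d.insert p.1 (p.2.map g).sum) (PySem.Dict.empty : PySem.Dict κ Int)).items := by
    intro g
    set M := qd.foldl (fun d q => d.modify (k q) 0 (fun x => x + g q)) (PySem.Dict.empty : PySem.Dict κ Int) with hM
    have hnodM : M.keys.Nodup := by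
      rw [hM]
      exact PySem.Dict.nodup_keys_foldl_modify_key qd k 0 (fun _ q => fun x => x + g q) _ (by simp)
    have hkeys : M.keys = G.keys := by
      have h1 := PySem.Dict.keys_foldl_modify_key qd k 0 (fun _ q => fun x => x + g q)
          (PySem.Dict.empty : PySem.Dict κ Int)
      have h2 := PySem.Dict.keys_foldl_modify_key qd k [] (fun _ q => fun x => x ++ [q])
          (PySem.Dict.empty : PySem.Dict κ (List β))
      simp only [] at h1 h2
      rw [hM, hG, h1, h2]
      simp
    have hM_getD : ∀ s, M.getD s 0 = ((qd.filter (fun q => k q == s)).map g).sum := fun s => by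
      rw [hM]
      have h := pv_foldl_modify_add_getD k g qd PySem.Dict.empty s
      simpa using h
    have hnodfst : (G.items.map (fun p => p.1)).Nodup := by
      simpa [PySem.Dict.keys] using hnodG
    have hBitems := PySem.Dict.items_foldl_insert_fresh G.items (fun p => p.1)
        (fun p => (p.2.map g).sum) (PySem.Dict.empty : PySem.Dict κ Int) (by simp) hnodfst
    simp only [] at hBitems
    rw [hBitems, PySem.Dict.items_eq_map_keys M hnodM 0, PySem.Dict.items_eq_map_keys G hnodG [],
      List.map_map, hkeys]
    simp only [show (PySem.Dict.empty : PySem.Dict κ Int).items = [] from rfl, List.nil_append]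
    refine List.map_congr_left (fun s _ => ?_)
    simp [Function.comp, hM_getD, hG_getD]
  rw [side f, side t]

-- ===== VERDICT (by name: the statement is the Claim_ definition above) =====
theorem calculate_total_marks_and_duration_by_set_spec : Claim_equal_calculate_total_marks_and_duration_by_set := by
  intro qd _
  exact pv_main pvKeyOf pvNet pvTime qd
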